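-- pv_equiv track=rewrite | github.com/chikaskas/xobot | good_bot_creator.py | get_squares_left
-- ===== SOURCE A (Python) =====
-- def get_squares_left(player_char: str, table: str):
--     squares_left = [
--     [0, 1, 2], #row 1
--     [3, 4, 5], #row 2
--     [6, 7, 8], #row 3
--     [0, 3, 6], #column 1
--     [1, 4, 7], #column 2
--     [2, 5, 8], #column 3
--     [0, 4, 8], #diagonal 1
--     [2, 4, 6]  #diagonal 2
-- ]
--     for index, character in enumerate(table):
--         if character == player_char:
--             for condition in squares_left:
--                 if index in condition:
--                     condition.remove(index)
--     return squares_left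
-- ===== SOURCE B (Python) =====
-- def get_squares_left(player_char: str, table: str):
--     # Precompute the set of board indices the player occupies, then filter
--     # each fixed win-line against it (inverted traversal: lines outer, no mutation).
--     base_lines = [
--         [0, 1, 2], [3, 4, 5], [6, 7, 8],
--         [0, 3, 6], [1, 4, 7], [2, 5, 8],
--         [0, 4, 8], [2, 4, 6],
--     ]
--     occupied = {i for i, c in enumerate(table) if c == player_char}
--     return [[x for x in line if x not in occupied] for line in base_lines]
-- ===== Notes on version B (the rewrite author's own statement) =====
-- stated objective: simpler
-- what changed: B precomputes the set of the player's occupied indices in one pass and builds each of the 8 fixed win-lines by filtering against that set, instead of A's cell-by-cell loop that mutates every line in place with an inner membership scan and list.remove.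
import Mathlib
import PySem

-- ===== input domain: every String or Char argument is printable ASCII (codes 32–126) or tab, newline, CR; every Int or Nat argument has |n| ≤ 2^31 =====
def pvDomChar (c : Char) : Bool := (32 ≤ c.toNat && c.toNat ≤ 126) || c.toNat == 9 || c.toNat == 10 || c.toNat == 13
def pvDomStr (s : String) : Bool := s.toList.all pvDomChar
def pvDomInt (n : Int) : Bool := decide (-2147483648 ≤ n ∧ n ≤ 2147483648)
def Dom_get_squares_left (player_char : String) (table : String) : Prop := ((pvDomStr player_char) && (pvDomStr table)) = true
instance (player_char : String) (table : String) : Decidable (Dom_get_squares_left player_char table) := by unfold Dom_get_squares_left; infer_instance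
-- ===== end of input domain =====

-- B precomputes the player's occupied indices once and filters each fixed win-line
-- against that set, instead of A's per-cell in-place mutation of every line (simpler).

-- shared helper: Python's enumerate over a character list, starting at index i
def pvEnum (i : Int) : List Char → List (Int × Char)
  | [] => []
  | c :: cs => (i, c) :: pvEnum (i + 1) cs

-- ===== PORT A =====
def pvInit : List (List Int) :=
  [[0, 1, 2], [3, 4, 5], [6, 7, 8], [0, 3, 6], [1, 4, 7], [2, 5, 8], [0, 4, 8], [2, 4, 6]]

-- one iteration of A's outer loop body: if character == player_char, scan every
-- condition and remove index from those containing it (remove = erase first occurrence)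
def pvAStep (player_char : String) (lines : List (List Int)) (ic : Int × Char) : List (List Int) :=
  if String.mk [ic.2] == player_char then
    lines.map (fun condition => if ic.1 ∈ condition then condition.erase ic.1 else condition)
  else
    lines

def get_squares_left (player_char : String) (table : String) : List (List Int) :=
  (pvEnum 0 table.toList).foldl (pvAStep player_char) pvInit

-- ===== PORT B =====
def pvOccupied (player_char : String) (table : String) : PySem.Set Int :=
  PySem.Set.ofList ((pvEnum 0 table.toList).filterMap
    (fun ic => if String.mk [ic.2] == player_char then some ic.1 else none))

def get_squares_left_alt (player_char : String) (table : String) : List (List Int) :=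
  let occupied := pvOccupied player_char table
  pvInit.map (fun line => line.filter (fun x => !(decide (x ∈ occupied))))

-- ===== PRECONDITION & SPEC =====
def Spec_get_squares_left (player_char : String) (table : String) (out : List (List Int)) : Prop := out = get_squares_left_alt player_char table
instance (player_char : String) (table : String) (out : List (List Int)) : Decidable (Spec_get_squares_left player_char table out) := by unfold Spec_get_squares_left; infer_instance

-- ===== CLAIM (what is proved, stated in full; the proofs are below) =====
def Claim_equal_get_squares_left : Prop := ∀ (player_char : String) (table : String), Dom_get_squares_left player_char table → Spec_get_squares_left player_char table (get_squares_left player_char table)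

-- ===== LEMMAS AND PROOFS =====

-- the per-line effect of one of A's outer-loop iterations
def pvCellStep (player_char : String) (ic : Int × Char) (l : List Int) : List Int :=
  if String.mk [ic.2] == player_char then (if ic.1 ∈ l then l.erase ic.1 else l) else l

-- the indices of matching characters among a pair list
def pvMatches (player_char : String) (pairs : List (Int × Char)) : List Int :=
  pairs.filterMap (fun ic => if String.mk [ic.2] == player_char then some ic.1 else none)

lemma pvAStep_eq_map (player_char : String) (lines : List (List Int)) (ic : Int × Char) :
    pvAStep player_char lines ic = lines.map (pvCellStep player_char ic) := by
  unfold pvAStep pvCellStep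
  split
  · rfl
  · simp

lemma pvFoldl_map (player_char : String) :
    ∀ (pairs : List (Int × Char)) (lines : List (List Int)),
      pairs.foldl (pvAStep player_char) lines
        = lines.map (fun l => pairs.foldl (fun l ic => pvCellStep player_char ic l) l) := by
  intro pairs
  induction pairs with
  | nil => intro lines; simp
  | cons ic rest ih =>
      intro lines
      simp only [List.foldl_cons, pvAStep_eq_map, ih, List.map_map]
      rfl

lemma pvLineFold_filter (player_char : String) :
    ∀ (pairs : List (Int × Char)) (l : List Int), l.Nodup →
      pairs.foldl (fun l ic => pvCellStep player_char ic l) l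
        = l.filter (fun x => !(decide (x ∈ pvMatches player_char pairs))) := by
  intro pairs
  induction pairs with
  | nil => intro l _; simp [pvMatches]
  | cons ic rest ih =>
      intro l hnd
      simp only [List.foldl_cons]
      by_cases hm : String.mk [ic.2] == player_char
      · have hstep : pvCellStep player_char ic l = l.filter (fun x => x != ic.1) := by
          unfold pvCellStep
          rw [if_pos hm]
          by_cases hin : ic.1 ∈ l
          · rw [if_pos hin, List.Nodup.erase_eq_filter hnd]
          · rw [if_neg hin, List.filter_eq_self.mpr]
            intro a ha
            simp only [bne_iff_ne, ne_eq]
            exact fun h => hin (h ▸ ha)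
        rw [hstep, ih _ (hnd.filter _), List.filter_filter]
        have hmatch : pvMatches player_char (ic :: rest) = ic.1 :: pvMatches player_char rest := by
          unfold pvMatches
          simp [List.filterMap_cons, beq_iff_eq.mp hm]
        rw [hmatch]
        apply List.filter_congr
        intro x _
        simp only [List.mem_cons]
        by_cases h1 : x = ic.1 <;> by_cases h2 : x ∈ pvMatches player_char rest <;>
          simp [h1, h2]
      · have hstep : pvCellStep player_char ic l = l := by
          unfold pvCellStep; rw [if_neg hm]
        have hmatch : pvMatches player_char (ic :: rest) = pvMatches player_char rest := by
          have h : ¬ String.mk [ic.2] = player_char := fun h => hm (beq_iff_eq.mpr h)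
          unfold pvMatches
          simp [List.filterMap_cons, h]
        rw [hstep, ih _ hnd, hmatch]

lemma pvInit_nodup : ∀ l ∈ pvInit, l.Nodup := by decide

-- ===== VERDICT (by name: the statement is the Claim_ definition above) =====
theorem get_squares_left_spec : Claim_equal_get_squares_left := by
  intro player_char table _
  unfold Spec_get_squares_left get_squares_left get_squares_left_alt pvOccupied
  rw [pvFoldl_map]
  apply List.map_congr_left
  intro l hl
  rw [pvLineFold_filter player_char _ l (pvInit_nodup l hl)]
  apply List.filter_congr
  intro x _
  simp [pvMatches, PySem.Set.mem_ofList]
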